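-- pv_equiv track=rewrite | github.com/CodeCodeUp/brich | dealdata/statistics_sb_data.py | count_sb_odds_evens
-- ===== SOURCE A (Python) =====
-- from collections import Counter
--
-- def count_sb_odds_evens(data):
--     def is_odd(num):
--         num = int(num)
--         return 4 <= num <= 10
--
--     odd_counts = []
--     even_counts = []
--
--     # 初始化计数
--     current_count = 1
--     is_current_odd = is_odd(data[0])
--
--     # 遍历数据并统计连续单数或双数
--     for i in range(1, len(data)):
--         if int(data[i]) == -1:
--             # 遇到-1，重置计数
--             if is_current_odd:
--                 odd_counts.append(current_count)
--             else:
--                 even_counts.append(current_count)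
--             is_current_odd = is_odd(data[i])
--             current_count = 1
--             continue
--         if is_odd(data[i]) == is_current_odd:
--             current_count += 1
--         else:
--             if is_current_odd:
--                 odd_counts.append(current_count)
--             else:
--                 even_counts.append(current_count)
--             is_current_odd = is_odd(data[i])
--             current_count = 1
--
--     # 不要忘了添加最后一组连续计数
--     if is_current_odd:
--         odd_counts.append(current_count)
--     else:
--         even_counts.append(current_count)
--
--     # 使用Counter统计每个连续次数出现的次数
--     odd_count_results = Counter(odd_counts)
--     even_count_results = Counter(even_counts)
--
--     return odd_count_results, even_count_results
-- ===== SOURCE B (Python) =====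
-- from collections import Counter
--
--
-- def count_sb_odds_evens(data):
--     def is_odd(num):
--         num = int(num)
--         return 4 <= num <= 10
--
--     # Boundary-index decomposition: list the (index, element) start of every
--     # run, turn consecutive start indices into run lengths by subtraction,
--     # then tally the lengths by the parity of each run's starting element.
--     starts = [(0, data[0])] + [
--         (i, x) for i, (p, x) in enumerate(zip(data, data[1:]), 1)
--         if int(x) == -1 or is_odd(x) != is_odd(p)
--     ]
--     bounds = [i for i, _ in starts[1:]] + [len(data)]
--     lengths = [(e - s, is_odd(x)) for (s, x), e in zip(starts, bounds)]
--     odd = Counter(l for l, o in lengths if o)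
--     even = Counter(l for l, o in lengths if not o)
--     return odd, even
-- ===== Notes on version B (the rewrite author's own statement) =====
-- stated objective: alternative
-- what changed: A's one-pass state machine carrying a current-parity flag and a running count is replaced by a boundary-index algorithm: collect the (index, element) start of every run via enumerate over adjacent pairs, obtain run lengths as differences of consecutive start indices, and tally those lengths by the parity of each run's starting element.
import Mathlib
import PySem

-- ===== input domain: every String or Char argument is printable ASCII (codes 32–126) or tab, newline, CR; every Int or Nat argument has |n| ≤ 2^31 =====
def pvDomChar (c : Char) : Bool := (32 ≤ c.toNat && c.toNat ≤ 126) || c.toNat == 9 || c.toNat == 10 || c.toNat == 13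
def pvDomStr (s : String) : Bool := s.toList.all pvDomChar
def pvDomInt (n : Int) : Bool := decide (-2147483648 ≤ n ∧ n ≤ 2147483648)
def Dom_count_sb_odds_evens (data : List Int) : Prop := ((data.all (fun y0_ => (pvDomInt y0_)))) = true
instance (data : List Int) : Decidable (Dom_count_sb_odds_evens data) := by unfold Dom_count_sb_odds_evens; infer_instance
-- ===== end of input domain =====

-- B replaces A's one-pass parity/count state machine by a boundary-index algorithm
-- (collect run-start indices, subtract consecutive ones for lengths); objective: alternative.

-- is_odd(num): 4 <= int(num) <= 10 (ints: int() is the identity)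
def pvIsOddSB (num : Int) : Bool := decide (4 ≤ num ∧ num ≤ 10)

-- ===== PORT A =====
-- A's for-loop body over i in range(1, len(data)) reads only data[i]; ported as a
-- fold over the tail elements (the same values, in the same order).
def pvALoop (st : List Int × List Int × Int × Bool) (x : Int) : List Int × List Int × Int × Bool :=
  match st with
  | (oc, ec, cc, od) =>
    if x == -1 then
      if od then (oc ++ [cc], ec, 1, pvIsOddSB x) else (oc, ec ++ [cc], 1, pvIsOddSB x)
    else if pvIsOddSB x == od then (oc, ec, cc + 1, od)
    else if od then (oc ++ [cc], ec, 1, pvIsOddSB x) else (oc, ec ++ [cc], 1, pvIsOddSB x)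

def count_sb_odds_evens (data : List Int) : (List (Int × Int)) × (List (Int × Int)) :=
  match data with
  | [] => ([], [])  -- Python: data[0] raises IndexError here; excluded by Pre_
  | d0 :: rest =>
    match rest.foldl pvALoop ([], [], 1, pvIsOddSB d0) with
    | (oc, ec, cc, od) =>
      let oc2 := if od then oc ++ [cc] else oc
      let ec2 := if od then ec else ec ++ [cc]
      ((PySem.Dict.counter oc2).items, (PySem.Dict.counter ec2).items)

-- ===== PORT B =====
-- condition of B's comprehension: int(x) == -1 or is_odd(x) != is_odd(p)
def pvBreakSB (p x : Int) : Bool := (x == -1) || (pvIsOddSB x != pvIsOddSB p)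

-- B's comprehension [(i, x) for i, (p, x) in enumerate(zip(data, data[1:]), j) if …]
def pvStartsFrom (prev : Int) (xs : List Int) (j : Int) : List (Int × Int) :=
  ((PySem.List.enumerate (List.zip (prev :: xs) xs) j).filter
      (fun ix => pvBreakSB ix.2.1 ix.2.2)).map (fun ix => (ix.1, ix.2.2))

def count_sb_odds_evens_alt (data : List Int) : (List (Int × Int)) × (List (Int × Int)) :=
  match data with
  | [] => ([], [])  -- Python: data[0] raises IndexError here; excluded by Pre_
  | d0 :: rest =>
    let starts : List (Int × Int) := ((0 : Int), d0) :: pvStartsFrom d0 rest 1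
    let bounds : List Int := (starts.drop 1).map (·.1) ++ [((d0 :: rest).length : Int)]
    let lengths : List (Int × Bool) :=
      (starts.zip bounds).map (fun se => (se.2 - se.1.1, pvIsOddSB se.1.2))
    ((PySem.Dict.counter ((lengths.filter (·.2)).map (·.1))).items,
     (PySem.Dict.counter ((lengths.filter (fun lo => !lo.2)).map (·.1))).items)

-- ===== PRECONDITION & SPEC =====
-- Python A raises IndexError on the empty list (data[0]); Pre_ excludes exactly that input.
def Pre_count_sb_odds_evens (data : List Int) : Prop := data ≠ []
instance (data : List Int) : Decidable (Pre_count_sb_odds_evens data) := by unfold Pre_count_sb_odds_evens; infer_instance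
def pvWitness_count_sb_odds_evens : List Int := [3, 5, -1, 2]

def Spec_count_sb_odds_evens (data : List Int) (out : (List (Int × Int)) × (List (Int × Int))) : Prop := out = count_sb_odds_evens_alt data
instance (data : List Int) (out : (List (Int × Int)) × (List (Int × Int))) : Decidable (Spec_count_sb_odds_evens data out) := by unfold Spec_count_sb_odds_evens; infer_instance

-- ===== CLAIM (what is proved, stated in full; the proofs are below) =====
def Claim_equal_count_sb_odds_evens : Prop := ∀ (data : List Int), Dom_count_sb_odds_evens data → Pre_count_sb_odds_evens data → Spec_count_sb_odds_evens data (count_sb_odds_evens data)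

-- ===== LEMMAS AND PROOFS =====

-- reference: the (length, parity) list of the runs of prev :: xs, the current run
-- having started cnt elements ago with parity pvIsOddSB prev
def pvRuns (prev : Int) (cnt : Int) : List Int → List (Int × Bool)
  | [] => [(cnt, pvIsOddSB prev)]
  | x :: xs =>
    if pvBreakSB prev x then (cnt, pvIsOddSB prev) :: pvRuns x 1 xs
    else pvRuns x (cnt + 1) xs

def pvOddsOf (rs : List (Int × Bool)) : List Int := (rs.filter (·.2)).map (·.1)
def pvEvensOf (rs : List (Int × Bool)) : List Int := (rs.filter (fun lo => !lo.2)).map (·.1)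

def pvFinA (st : List Int × List Int × Int × Bool) : List Int × List Int :=
  match st with
  | (oc, ec, cc, od) => (if od then oc ++ [cc] else oc, if od then ec else ec ++ [cc])

lemma pvKeyA : ∀ (xs : List Int) (prev : Int) (oc ec : List Int) (cnt : Int),
    pvFinA (xs.foldl pvALoop (oc, ec, cnt, pvIsOddSB prev))
      = (oc ++ pvOddsOf (pvRuns prev cnt xs), ec ++ pvEvensOf (pvRuns prev cnt xs)) := by
  intro xs
  induction xs with
  | nil =>
    intro prev oc ec cnt
    by_cases h : pvIsOddSB prev <;>
      simp [pvFinA, pvRuns, pvOddsOf, pvEvensOf, h]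
  | cons x xs ih =>
    intro prev oc ec cnt
    rw [List.foldl_cons]
    by_cases hx : x = -1
    · subst hx
      have : pvBreakSB prev (-1) = true := by simp [pvBreakSB]
      by_cases h : pvIsOddSB prev <;>
        simp [pvALoop, pvRuns, this, h, ih, pvOddsOf, pvEvensOf, List.append_assoc]
    · by_cases hp : pvIsOddSB x = pvIsOddSB prev
      · have hb : pvBreakSB prev x = false := by simp [pvBreakSB, hx, hp]
        have hA : pvALoop (oc, ec, cnt, pvIsOddSB prev) x = (oc, ec, cnt + 1, pvIsOddSB x) := by
          simp [pvALoop, hx, hp]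
        rw [hA, ih x, pvRuns, hb]
        simp
      · have hb : pvBreakSB prev x = true := by simp [pvBreakSB, hx, hp]
        have hA : pvALoop (oc, ec, cnt, pvIsOddSB prev) x
            = (if pvIsOddSB prev then oc ++ [cnt] else oc,
               if pvIsOddSB prev then ec else ec ++ [cnt], 1, pvIsOddSB x) := by
          by_cases h : pvIsOddSB prev <;> simp_all [pvALoop]
        rw [hA]
        by_cases h : pvIsOddSB prev <;>
          simp [h, ih x, pvRuns, hb, pvOddsOf, pvEvensOf, List.append_assoc]

lemma pvKeyB : ∀ (xs : List Int) (prev x0 s j : Int),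
    pvIsOddSB prev = pvIsOddSB x0 →
    ((((s, x0) :: pvStartsFrom prev xs j).zip
        ((pvStartsFrom prev xs j).map (·.1) ++ [j + (xs.length : Int)])).map
      (fun se => (se.2 - se.1.1, pvIsOddSB se.1.2)))
      = pvRuns prev (j - s) xs := by
  intro xs
  induction xs with
  | nil =>
    intro prev x0 s j hp
    simp [pvStartsFrom, pvRuns, PySem.List.enumerate_nil, hp]
  | cons x xs ih =>
    intro prev x0 s j hp
    have hunf : pvStartsFrom prev (x :: xs) j
        = (if pvBreakSB prev x then [((j : Int), x)] else []) ++ pvStartsFrom x xs (j + 1) := by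
      by_cases hb : pvBreakSB prev x <;>
        simp [pvStartsFrom, List.zip_cons_cons, PySem.List.enumerate_cons, hb]
    have hlen : (j : Int) + (((x :: xs).length : Int)) = (j + 1) + (xs.length : Int) := by
      simp only [List.length_cons]; push_cast; omega
    by_cases hb : pvBreakSB prev x
    · rw [hunf]
      simp only [hb, if_pos, List.nil_append, List.map_cons,
        List.cons_append, List.zip_cons_cons, hlen]
      rw [ih x x j (j + 1) rfl, pvRuns, if_pos hb]
      have h1 : j + 1 - j = (1 : Int) := by omega
      rw [h1, hp]
    · have hpar : pvIsOddSB x = pvIsOddSB x0 := by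
        have : pvIsOddSB x = pvIsOddSB prev := by
          simp [pvBreakSB] at hb; exact hb.2
        rw [this, hp]
      rw [hunf]
      simp only [hb, if_neg, Bool.false_eq_true, not_false_iff, List.nil_append, hlen]
      rw [ih x x0 s (j + 1) hpar, pvRuns, if_neg (by simp [hb])]
      congr 1
      omega

-- ===== VERDICT (by name: the statement is the Claim_ definition above) =====
theorem count_sb_odds_evens_spec : Claim_equal_count_sb_odds_evens := by
  intro data _ hpre
  unfold Spec_count_sb_odds_evens
  cases data with
  | nil => exact absurd rfl hpre
  | cons d0 rest =>
    have hA := pvKeyA rest d0 [] [] 1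
    have hB := pvKeyB rest d0 d0 0 1 rfl
    simp only [count_sb_odds_evens, count_sb_odds_evens_alt]
    rcases hfa : rest.foldl pvALoop ([], [], 1, pvIsOddSB d0) with ⟨oc, ec, cc, od⟩
    rw [hfa] at hA
    simp only [pvFinA, List.nil_append] at hA
    have hlen : ((d0 :: rest).length : Int) = 0 + 1 + (rest.length : Int) := by
      push_cast [List.length_cons]; ring
    have h1 : (1 : Int) - 0 = 1 := by norm_num
    rw [hlen]
    have hB' := hB
    rw [h1] at hB'
    -- rewrite B's lengths list via pvRuns
    have : (((((0 : Int), d0) :: pvStartsFrom d0 rest 1).zip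
        ((pvStartsFrom d0 rest 1).map (·.1) ++ [0 + 1 + (rest.length : Int)])).map
        (fun se => (se.2 - se.1.1, pvIsOddSB se.1.2))) = pvRuns d0 1 rest := by
      have := hB'
      simpa using this
    simp only [List.drop_one, List.tail_cons]
    rw [this]
    obtain ⟨h1', h2'⟩ := Prod.mk.injEq .. ▸ hA
    simp only [pvOddsOf, pvEvensOf] at h1' h2'
    rw [h1', h2']
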